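-- pv_equiv track=rewrite | github.com/zhangyuejoslin/Annotation | parser_file/parser_for_spatial_indicator.py | tokenindex_to_text
-- ===== SOURCE A (Python) =====
-- def tokenindex_to_text(dictionary, mathing_token):
--     phrase = []
--     for each_token_text in dictionary:
--         if mathing_token[0] == each_token_text[1][0]:
--             if  mathing_token[1] == each_token_text[1][1]:
--                 return each_token_text[0]
--             else:
--                 for after_token_text in dictionary[dictionary.index(each_token_text):]:
--                     phrase.append(after_token_text[0])
--                     if mathing_token[1] == after_token_text[1][1]:
--                         return " ".join(phrase)
-- ===== SOURCE B (Python) =====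
-- def tokenindex_to_text(dictionary, mathing_token):
--     started = False
--     phrase = []
--     for name, (start, end) in dictionary:
--         if started:
--             phrase.append(name)
--             if mathing_token[1] == end:
--                 return " ".join(phrase)
--         elif mathing_token[0] == start:
--             if mathing_token[1] == end:
--                 return name
--             started = True
--             phrase.append(name)
--     return None
-- ===== Notes on version B (the rewrite author's own statement) =====
-- stated objective: simpler
-- what changed: Replaced A's nested outer/inner scans with dictionary.index and re-slicing by one flat pass over the list with a boolean started flag and an accumulator; the outer re-entry and leftover phrase state of A are dead because the first start-match dominates, so the single pass is exactly equivalent.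
import Mathlib
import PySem

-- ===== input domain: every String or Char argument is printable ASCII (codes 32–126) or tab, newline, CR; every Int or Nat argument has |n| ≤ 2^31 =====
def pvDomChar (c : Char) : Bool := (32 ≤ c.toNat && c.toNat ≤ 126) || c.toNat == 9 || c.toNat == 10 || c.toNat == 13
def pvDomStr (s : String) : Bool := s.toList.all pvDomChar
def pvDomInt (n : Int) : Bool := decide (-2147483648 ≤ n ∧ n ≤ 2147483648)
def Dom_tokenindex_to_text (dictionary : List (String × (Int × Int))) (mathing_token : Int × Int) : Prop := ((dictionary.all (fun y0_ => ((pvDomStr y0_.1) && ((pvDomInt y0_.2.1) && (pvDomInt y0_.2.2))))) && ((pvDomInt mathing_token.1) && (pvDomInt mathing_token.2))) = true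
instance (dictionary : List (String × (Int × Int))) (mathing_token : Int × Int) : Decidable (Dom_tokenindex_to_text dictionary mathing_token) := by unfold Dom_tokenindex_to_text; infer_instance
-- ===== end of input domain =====

-- B replaces A's nested scans (with dictionary.index and re-slicing) by one flat pass with a
-- started-flag and accumulator; objective: simpler.

-- ===== PORT A =====
-- inner 'for after_token_text in dictionary[...]' loop: Sum.inl s = 'return " ".join(phrase)',
-- Sum.inr phrase = loop exhausted, phrase as mutated
def pvInnerA (mt : Int × Int) : List (String × (Int × Int)) → List String → Sum String (List String)
  | [], phrase => Sum.inr phrase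
  | a :: rest, phrase =>
    let phrase' := phrase ++ [a.1]
    if mt.2 == a.2.2 then Sum.inl (PySem.Str.join " " phrase')
    else pvInnerA mt rest phrase'

-- outer 'for each_token_text in dictionary' loop, carrying the mutable phrase
def pvOuterA (dictionary : List (String × (Int × Int))) (mt : Int × Int) :
    List (String × (Int × Int)) → List String → Option String
  | [], _ => none
  | e :: rest, phrase =>
    if mt.1 == e.2.1 then
      if mt.2 == e.2.2 then some e.1
      else
        match PySem.List.index? dictionary e with
        | none => none  -- dictionary.index would raise; unreachable since e ∈ dictionary
        | some k =>
          match pvInnerA mt (PySem.List.slice dictionary (some (k : Int)) none) phrase with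
          | Sum.inl s => some s
          | Sum.inr phrase' => pvOuterA dictionary mt rest phrase'
    else pvOuterA dictionary mt rest phrase

def tokenindex_to_text (dictionary : List (String × (Int × Int))) (mathing_token : Int × Int) : Option String :=
  pvOuterA dictionary mathing_token dictionary []

-- ===== PORT B =====
def pvLoopB (mt : Int × Int) : List (String × (Int × Int)) → Bool → List String → Option String
  | [], _, _ => none
  | e :: rest, started, phrase =>
    if started then
      let phrase' := phrase ++ [e.1]
      if mt.2 == e.2.2 then some (PySem.Str.join " " phrase')
      else pvLoopB mt rest true phrase'
    else if mt.1 == e.2.1 then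
      if mt.2 == e.2.2 then some e.1
      else pvLoopB mt rest true (phrase ++ [e.1])
    else pvLoopB mt rest false phrase

def tokenindex_to_text_alt (dictionary : List (String × (Int × Int))) (mathing_token : Int × Int) : Option String :=
  pvLoopB mathing_token dictionary false []

-- ===== PRECONDITION & SPEC =====
def Spec_tokenindex_to_text (dictionary : List (String × (Int × Int))) (mathing_token : Int × Int) (out : Option String) : Prop := out = tokenindex_to_text_alt dictionary mathing_token
instance (dictionary : List (String × (Int × Int))) (mathing_token : Int × Int) (out : Option String) : Decidable (Spec_tokenindex_to_text dictionary mathing_token out) := by unfold Spec_tokenindex_to_text; infer_instance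

-- ===== CLAIM (what is proved, stated in full; the proofs are below) =====
def Claim_equal_tokenindex_to_text : Prop := ∀ (dictionary : List (String × (Int × Int))) (mathing_token : Int × Int), Dom_tokenindex_to_text dictionary mathing_token → Spec_tokenindex_to_text dictionary mathing_token (tokenindex_to_text dictionary mathing_token)

-- ===== LEMMAS AND PROOFS =====

-- B's started=true phase is A's inner loop: returns the inner loop's join if it fires, else none
theorem loopB_true_eq_innerA (mt : Int × Int) (l : List (String × (Int × Int))) (phrase : List String) :
    pvLoopB mt l true phrase =
      (match pvInnerA mt l phrase with
       | Sum.inl s => some s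
       | Sum.inr _ => none) := by
  induction l generalizing phrase with
  | nil => rfl
  | cons a rest ih =>
    simp only [pvLoopB, pvInnerA]
    by_cases h : (mt.2 == a.2.2)
    · simp [h]
    · simp only [Bool.not_eq_true] at h
      simp [h, ih]

-- if the inner loop exhausts, no end-match exists in the scanned list
theorem innerA_inr_noE (mt : Int × Int) (l : List (String × (Int × Int))) (phrase phrase' : List String)
    (h : pvInnerA mt l phrase = Sum.inr phrase') :
    ∀ x ∈ l, (mt.2 == x.2.2) = false := by
  induction l generalizing phrase with
  | nil => simp
  | cons a rest ih =>
    simp only [pvInnerA] at h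
    by_cases hE : (mt.2 == a.2.2)
    · simp [hE] at h
    · simp only [Bool.not_eq_true] at hE
      simp only [hE] at h
      intro x hx
      rcases List.mem_cons.mp hx with rfl | hx
      · exact hE
      · exact ih _ h x hx

-- if no end-match exists in the scanned list, the inner loop exhausts
theorem innerA_noE_inr (mt : Int × Int) (l : List (String × (Int × Int))) (phrase : List String)
    (h : ∀ x ∈ l, (mt.2 == x.2.2) = false) :
    ∃ phrase', pvInnerA mt l phrase = Sum.inr phrase' := by
  induction l generalizing phrase with
  | nil => exact ⟨phrase, rfl⟩
  | cons a rest ih =>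
    have hE := h a (List.mem_cons_self ..)
    simp only [pvInnerA, hE]
    exact ih _ (fun x hx => h x (List.mem_cons_of_mem _ hx))

-- once the first start-match's forward scan found no end-match, A's continued outer loop returns none
theorem outerA_dead (dictionary : List (String × (Int × Int))) (mt : Int × Int)
    (pre : List (String × (Int × Int)))
    (hpre : ∀ x ∈ pre, (mt.1 == x.2.1) = false)
    (hnoE : ∀ x ∈ dictionary.drop pre.length, (mt.2 == x.2.2) = false) :
    ∀ (suf : List (String × (Int × Int))) (mid : List (String × (Int × Int)))
      (_hd : dictionary = pre ++ mid ++ suf) (phrase : List String),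
      pvOuterA dictionary mt suf phrase = none := by
  intro suf
  induction suf with
  | nil => intro _ _ _; rfl
  | cons x rest ih =>
    intro mid hd phrase
    subst hd
    have hdrop : (pre ++ mid ++ x :: rest).drop pre.length = mid ++ x :: rest := by
      rw [List.append_assoc, List.drop_left]
    have hxdrop : x ∈ (pre ++ mid ++ x :: rest).drop pre.length := by
      rw [hdrop]
      exact List.mem_append_right _ (List.mem_cons_self ..)
    have hEx : (mt.2 == x.2.2) = false := hnoE x hxdrop
    simp only [pvOuterA]
    by_cases hP : (mt.1 == x.2.1)
    · simp only [hP, if_true, hEx, if_neg Bool.false_ne_true]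
      -- dictionary.index(x)
      have hxmem : x ∈ pre ++ mid ++ x :: rest := List.mem_of_mem_drop hxdrop
      obtain ⟨k, hk⟩ := Option.isSome_iff_exists.mp ((PySem.List.index?_isSome_iff _ x).mpr hxmem)
      obtain ⟨hklt, hget, -⟩ := PySem.List.getElem_of_index?_eq_some hk
      have hkge : pre.length ≤ k := by
        by_contra hlt
        rw [Nat.not_le] at hlt
        have h1 : k < (pre ++ mid).length := by simp; omega
        rw [List.getElem_append_left h1, List.getElem_append_left hlt] at hget
        have hmem : x ∈ pre := by rw [← hget]; exact List.getElem_mem _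
        have := hpre _ hmem
        rw [this] at hP
        exact Bool.false_ne_true hP
      simp only [hk]
      rw [PySem.List.slice_from_natCast]
      have hsub : ∀ y ∈ (pre ++ mid ++ x :: rest).drop k,
          y ∈ (pre ++ mid ++ x :: rest).drop pre.length := by
        intro y hy
        have heq : (pre ++ mid ++ x :: rest).drop k
            = ((pre ++ mid ++ x :: rest).drop pre.length).drop (k - pre.length) := by
          rw [List.drop_drop]; congr 1; omega
        rw [heq] at hy
        exact List.drop_subset _ _ hy
      obtain ⟨ph', hph'⟩ := innerA_noE_inr mt _ phrase (fun y hy => hnoE y (hsub y hy))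
      rw [hph']
      exact ih (mid ++ [x]) (by simp) ph'
    · simp only [Bool.not_eq_true] at hP
      simp only [hP, if_neg Bool.false_ne_true]
      exact ih (mid ++ [x]) (by simp) phrase

-- main invariant: as long as no start-match has been seen, A's outer loop = B's loop
theorem main_eq (dictionary : List (String × (Int × Int))) (mt : Int × Int) :
    ∀ (suf pre : List (String × (Int × Int))),
      dictionary = pre ++ suf →
      (∀ x ∈ pre, (mt.1 == x.2.1) = false) →
      pvOuterA dictionary mt suf [] = pvLoopB mt suf false [] := by
  intro suf
  induction suf with
  | nil => intro pre _ _; rfl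
  | cons e rest ih =>
    intro pre hd hpre
    simp only [pvOuterA, pvLoopB, if_neg Bool.false_ne_true]
    by_cases hP : (mt.1 == e.2.1)
    · simp only [hP, if_true]
      by_cases hE : (mt.2 == e.2.2)
      · simp [hE]
      · simp only [Bool.not_eq_true] at hE
        simp only [hE, if_neg Bool.false_ne_true]
        -- dictionary.index(e) = pre.length: e cannot equal any element of pre
        have hnotmem : e ∉ pre := by
          intro hmem
          have := hpre e hmem
          rw [this] at hP
          exact Bool.false_ne_true hP
        have hidx : PySem.List.index? dictionary e = some pre.length := by
          rw [PySem.List.index?_eq_some_iff]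
          exact ⟨pre, rest, hd, rfl, hnotmem⟩
        simp only [hidx]
        rw [PySem.List.slice_from_natCast, hd, List.drop_left]
        simp only [pvInnerA, hE, if_neg Bool.false_ne_true]
        rw [loopB_true_eq_innerA]
        cases hinner : pvInnerA mt rest ([] ++ [e.1]) with
        | inl s => rfl
        | inr ph' =>
          -- inner loop exhausted: no end-match anywhere from e on; A's continuation is dead
          show pvOuterA (pre ++ e :: rest) mt rest ph' = none
          have hnoE : ∀ x ∈ ((pre ++ e :: rest).drop pre.length), (mt.2 == x.2.2) = false := by
            rw [List.drop_left]
            intro x hx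
            rcases List.mem_cons.mp hx with rfl | hx
            · exact hE
            · exact innerA_inr_noE mt rest _ ph' hinner x hx
          rw [← hd] at hnoE
          have hdead := outerA_dead dictionary mt pre hpre hnoE rest [e] (by simpa using hd) ph'
          rw [hd] at hdead
          exact hdead
    · simp only [Bool.not_eq_true] at hP
      simp only [hP, if_neg Bool.false_ne_true]
      exact ih (pre ++ [e]) (by simp [hd]) (by
        intro x hx
        rcases List.mem_append.mp hx with hx | hx
        · exact hpre x hx
        · simp only [List.mem_singleton] at hx; subst hx; exact hP)

-- ===== VERDICT (by name: the statement is the Claim_ definition above) =====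
theorem tokenindex_to_text_spec : Claim_equal_tokenindex_to_text := by
  intro dictionary mathing_token _
  unfold Spec_tokenindex_to_text tokenindex_to_text tokenindex_to_text_alt
  exact main_eq dictionary mathing_token dictionary [] rfl (by simp)
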